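-- pv_equiv track=rewrite | github.com/robotframework/robotframework | src/robot/running/arguments.py | _parse_arg_spec
-- ===== SOURCE A (Python) =====
-- def _parse_arg_spec(argspec):
--     if not argspec:
--         return [], [], None
--     args = []
--     defaults = []
--     vararg = None
--     for token in argspec:
--         if vararg is not None:
--             raise TypeError
--         if token.startswith('*'):
--             vararg = token[1:]
--             continue
--         if '=' in token:
--             arg, default = token.split('=', 1)
--             args.append(arg)
--             defaults.append(default)
--             continue
--         if defaults:
--             raise TypeError
--         args.append(token)
--     return args, defaults, vararg
-- ===== SOURCE B (Python) =====
-- def _parse_arg_spec(argspec):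
--     if not argspec:
--         return [], [], None
--     tokens = list(argspec)
--     star = next((i for i, t in enumerate(tokens) if t.startswith('*')), None)
--     vararg = None
--     if star is not None:
--         if star != len(tokens) - 1:
--             raise TypeError
--         vararg = tokens[star][1:]
--         tokens = tokens[:star]
--     args, defaults = [], []
--     for t in tokens:
--         if '=' in t:
--             a, d = t.split('=', 1)
--             args.append(a)
--             defaults.append(d)
--         elif defaults:
--             raise TypeError
--         else:
--             args.append(t)
--     return args, defaults, vararg
-- ===== Notes on version B (the rewrite author's own statement) =====
-- stated objective: alternative
-- what changed: Replaces A's single stateful scan with a vararg flag by a two-phase decomposition: first locate the star token with an index search and truncate the list, then a flag-free pass that splits the remaining tokens into args/defaults.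
import Mathlib
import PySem

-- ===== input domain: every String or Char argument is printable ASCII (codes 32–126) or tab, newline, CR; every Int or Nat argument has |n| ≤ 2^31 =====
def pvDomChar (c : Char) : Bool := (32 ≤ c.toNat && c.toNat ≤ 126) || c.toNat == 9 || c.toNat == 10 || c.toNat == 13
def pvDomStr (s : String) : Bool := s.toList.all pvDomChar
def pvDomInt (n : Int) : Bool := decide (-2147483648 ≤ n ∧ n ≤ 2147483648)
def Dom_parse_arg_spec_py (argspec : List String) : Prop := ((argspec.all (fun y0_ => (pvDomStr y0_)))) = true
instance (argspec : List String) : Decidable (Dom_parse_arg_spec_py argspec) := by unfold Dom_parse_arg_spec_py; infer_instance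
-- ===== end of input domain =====

-- B replaces A's single stateful scan (vararg flag) by a two-phase decomposition:
-- find-and-strip the star token first, then a flag-free args/defaults pass (objective: alternative).

-- ===== PORT A =====
-- A's loop: state (args, defaults, vararg); where Python raises TypeError the port
-- returns the current state (those inputs are excluded by Pre_).
def pA_loop : List String → List String → List String → Option String → List String × List String × Option String
  | [], args, defaults, vararg => (args, defaults, vararg)
  | t :: rest, args, defaults, vararg =>
    if vararg.isSome then (args, defaults, vararg)  -- Python: raise TypeError
    else if PySem.Str.startswith t "*" then
      pA_loop rest args defaults (some (PySem.Str.slice t (some 1) none))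
    else if PySem.Str.isIn "=" t then
      -- arg, default = token.split('=', 1): '=' in token ⇒ exactly two pieces
      let parts := (PySem.Str.splitMax? t "=" 1).getD []
      pA_loop rest (args ++ [parts.headD ""]) (defaults ++ [(parts.drop 1).headD ""]) vararg
    else if defaults ≠ [] then (args, defaults, vararg)  -- Python: raise TypeError
    else pA_loop rest (args ++ [t]) defaults vararg

def parse_arg_spec_py (argspec : List String) : List String × List String × Option String :=
  if argspec = [] then ([], [], none)
  else pA_loop argspec [] [] none

-- ===== PORT B =====
-- flag-free second phase over the star-stripped tokens; raise ⇒ current state (outside Pre_)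
def pB_loop : List String → List String → List String → List String × List String
  | [], args, defaults => (args, defaults)
  | t :: rest, args, defaults =>
    if PySem.Str.isIn "=" t then
      let parts := (PySem.Str.splitMax? t "=" 1).getD []
      pB_loop rest (args ++ [parts.headD ""]) (defaults ++ [(parts.drop 1).headD ""])
    else if defaults ≠ [] then (args, defaults)  -- Python: raise TypeError
    else pB_loop rest (args ++ [t]) defaults

def parse_arg_spec_py_alt (argspec : List String) : List String × List String × Option String :=
  if argspec = [] then ([], [], none)
  else
    match argspec.findIdx? (fun t => PySem.Str.startswith t "*") with
    | none =>
      let p := pB_loop argspec [] []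
      (p.1, p.2, none)
    | some i =>
      if i ≠ argspec.length - 1 then ([], [], none)  -- Python: raise TypeError
      else
        let v := PySem.Str.slice (argspec.getD i "") (some 1) none
        let p := pB_loop (argspec.take i) [] []
        (p.1, p.2, some v)

-- ===== PRECONDITION & SPEC =====
-- Pre_ excludes exactly the inputs on which A raises TypeError: a '*'-token that is
-- not the last token, or a plain token (no '*' prefix, no '=') after a default-carrying token.
def Pre_parse_arg_spec_py (argspec : List String) : Prop :=
  (∀ t ∈ argspec.dropLast, PySem.Str.startswith t "*" = false) ∧
  List.Pairwise (fun a b =>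
    (PySem.Str.startswith a "*" = false ∧ PySem.Str.isIn "=" a = true) →
    (PySem.Str.startswith b "*" = true ∨ PySem.Str.isIn "=" b = true)) argspec
instance (argspec : List String) : Decidable (Pre_parse_arg_spec_py argspec) := by
  unfold Pre_parse_arg_spec_py; infer_instance

def pvWitness_parse_arg_spec_py : List String := ["a", "b=2", "*rest"]

def Spec_parse_arg_spec_py (argspec : List String) (out : List String × List String × Option String) : Prop := out = parse_arg_spec_py_alt argspec
instance (argspec : List String) (out : List String × List String × Option String) : Decidable (Spec_parse_arg_spec_py argspec out) := by unfold Spec_parse_arg_spec_py; infer_instance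

-- ===== CLAIM (what is proved, stated in full; the proofs are below) =====
def Claim_equal_parse_arg_spec_py : Prop := ∀ (argspec : List String), Dom_parse_arg_spec_py argspec → Pre_parse_arg_spec_py argspec → Spec_parse_arg_spec_py argspec (parse_arg_spec_py argspec)

-- ===== LEMMAS AND PROOFS =====

-- On star-free token lists both loops compute the same states step by step
-- (including the early stop where Python raises).
theorem pA_loop_no_star (l : List String)
    (hl : ∀ t ∈ l, PySem.Str.startswith t "*" = false) :
    ∀ (a d : List String),
      pA_loop l a d none = ((pB_loop l a d).1, (pB_loop l a d).2, none) := by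
  induction l with
  | nil => intro a d; simp [pA_loop, pB_loop]
  | cons t rest ih =>
    intro a d
    have ht : PySem.Chars.startswith t.toList ['*'] = false := by
      simpa using hl t (by simp)
    have hrest : ∀ x ∈ rest, PySem.Str.startswith x "*" = false := by
      intro x hx; exact hl x (by simp [hx])
    by_cases he : PySem.Chars.isIn ['='] t.toList = true
    · simp [pA_loop, pB_loop, ht, he, ih hrest]
    · by_cases hd : d = []
      · simp [pA_loop, pB_loop, ht, he, hd, ih hrest]
      · simp [pA_loop, pB_loop, ht, he, hd]

-- The star branch: A's scan of xs ++ [star-token] ends with vararg set, and the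
-- xs part matches B's flag-free pass, provided no plain-after-default raise occurs in xs.
theorem pA_loop_star (s : String) (hs : PySem.Str.startswith s "*" = true) :
    ∀ (xs : List String) (a d : List String),
      (∀ t ∈ xs, PySem.Str.startswith t "*" = false) →
      List.Pairwise (fun a b =>
        (PySem.Str.startswith a "*" = false ∧ PySem.Str.isIn "=" a = true) →
        (PySem.Str.startswith b "*" = true ∨ PySem.Str.isIn "=" b = true)) xs →
      (d ≠ [] → ∀ t ∈ xs, PySem.Str.isIn "=" t = true) →
      pA_loop (xs ++ [s]) a d none =
        ((pB_loop xs a d).1, (pB_loop xs a d).2,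
          some (PySem.Str.slice s (some 1) none)) := by
  intro xs
  induction xs with
  | nil =>
    intro a d _ _ _
    have hs' : PySem.Chars.startswith s.toList ['*'] = true := by simpa using hs
    simp [pA_loop, pB_loop, hs']
  | cons t rest ih =>
    intro a d hstar hpw hdef
    have ht : PySem.Chars.startswith t.toList ['*'] = false := by
      simpa using hstar t (by simp)
    have hrest : ∀ x ∈ rest, PySem.Str.startswith x "*" = false := by
      intro x hx; exact hstar x (by simp [hx])
    have hpw' := (List.pairwise_cons.mp hpw).2
    have hhead := (List.pairwise_cons.mp hpw).1
    by_cases he : PySem.Chars.isIn ['='] t.toList = true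
    · have heS : PySem.Str.isIn "=" t = true := by simpa using he
      have htS : PySem.Str.startswith t "*" = false := by simpa using ht
      have hdef' : ∀ (d' : List String), d' ≠ [] →
          ∀ x ∈ rest, PySem.Str.isIn "=" x = true := by
        intro _ _ x hx
        rcases hhead x hx ⟨htS, heS⟩ with h | h
        · rw [hrest x hx] at h
          exact Bool.noConfusion h
        · exact h
      simp only [List.cons_append, pA_loop, pB_loop]
      rw [if_neg (by simp), if_neg (by simp [ht]), if_pos heS, if_pos heS]
      exact ih _ _ hrest hpw' (hdef' _)
    · have hd : d = [] := by
        by_contra hd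
        have := hdef hd t (by simp)
        simp at this
        exact absurd this he
      subst hd
      have heS : ¬ PySem.Str.isIn "=" t = true := by simpa using he
      simp only [List.cons_append, pA_loop, pB_loop]
      rw [if_neg (by simp), if_neg (by simp [ht]), if_neg heS, if_neg heS,
        if_neg (by simp), if_neg (by simp)]
      exact ih (a ++ [t]) [] hrest hpw' (by simp)

-- ===== VERDICT (by name: the statement is the Claim_ definition above) =====
theorem parse_arg_spec_py_spec : Claim_equal_parse_arg_spec_py := by
  intro argspec _ hpre
  unfold Spec_parse_arg_spec_py parse_arg_spec_py parse_arg_spec_py_alt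
  by_cases hnil : argspec = []
  · simp [hnil]
  · simp only [if_neg hnil]
    obtain ⟨hstar, hpw⟩ := hpre
    cases hfind : argspec.findIdx? (fun t => PySem.Str.startswith t "*") with
    | none =>
      have hns : ∀ t ∈ argspec, PySem.Str.startswith t "*" = false := by
        intro t htm
        simpa using List.findIdx?_eq_none_iff.mp hfind t htm
      simp [pA_loop_no_star argspec hns [] []]
    | some i =>
      obtain ⟨hi_lt, hp, _⟩ := List.findIdx?_eq_some_iff_getElem.mp hfind
      have hsplit : argspec = argspec.dropLast ++ [argspec.getLast hnil] :=
        (List.dropLast_append_getLast hnil).symm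
      have hi_eq : i = argspec.length - 1 := by
        by_contra hne
        have hi_lt' : i < argspec.length - 1 := by omega
        have hmem : argspec[i] ∈ argspec.dropLast := by
          have hgl : argspec.dropLast[i]'(by simp [List.length_dropLast]; omega)
              = argspec[i] := by simp [List.getElem_dropLast]
          rw [← hgl]; exact List.getElem_mem _
        have hfalse := hstar _ hmem
        rw [hp] at hfalse; exact Bool.noConfusion hfalse
      subst hi_eq
      have hlast_star : PySem.Str.startswith (argspec.getLast hnil) "*" = true := by
        rw [List.getLast_eq_getElem]; exact hp
      simp only [ne_eq, not_true_eq_false, if_false]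
      have htake : argspec.take (argspec.length - 1) = argspec.dropLast := by
        rw [List.dropLast_eq_take]
      have hget : argspec.getD (argspec.length - 1) "" = argspec.getLast hnil := by
        rw [List.getD_eq_getElem _ _ hi_lt, List.getLast_eq_getElem]
      have hpw' : List.Pairwise (fun a b =>
          (PySem.Str.startswith a "*" = false ∧ PySem.Str.isIn "=" a = true) →
          (PySem.Str.startswith b "*" = true ∨ PySem.Str.isIn "=" b = true))
          argspec.dropLast := by
        have h := hpw
        rw [hsplit] at h
        exact (List.pairwise_append.mp h).1
      have hA := pA_loop_star (argspec.getLast hnil) hlast_star argspec.dropLast [] []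
        hstar hpw' (by simp)
      rw [htake, hget]
      calc pA_loop argspec [] [] none
          = pA_loop (argspec.dropLast ++ [argspec.getLast hnil]) [] [] none := by
            rw [← hsplit]
        _ = _ := by rw [hA]
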